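-- pv_equiv track=rewrite | github.com/pavantips/python | while2.py | check_nums
-- ===== SOURCE A (Python) =====
-- def check_nums(numbers):
--
--     if 5 not in numbers:
--         return numbers
--
--     newlist = []
--     i = 0
--
--     while i < len(numbers):
--         if numbers[i] == 7:
--             break
--         newlist.append(numbers[i])
--         i = i+1
--
--     return newlist
-- ===== SOURCE B (Python) =====
-- def check_nums(numbers):
--     if 5 not in numbers:
--         return numbers
--     if 7 in numbers:
--         return numbers[:numbers.index(7)]
--     return numbers[:]
-- ===== Notes on version B (the rewrite author's own statement) =====
-- stated objective: simpler
-- what changed: Replaces the manual index-driven while loop that appends elements one by one until a 7 with a single search for 7 followed by a slice (numbers[:index(7)]), copying the whole list when no 7 is present.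
import Mathlib
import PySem

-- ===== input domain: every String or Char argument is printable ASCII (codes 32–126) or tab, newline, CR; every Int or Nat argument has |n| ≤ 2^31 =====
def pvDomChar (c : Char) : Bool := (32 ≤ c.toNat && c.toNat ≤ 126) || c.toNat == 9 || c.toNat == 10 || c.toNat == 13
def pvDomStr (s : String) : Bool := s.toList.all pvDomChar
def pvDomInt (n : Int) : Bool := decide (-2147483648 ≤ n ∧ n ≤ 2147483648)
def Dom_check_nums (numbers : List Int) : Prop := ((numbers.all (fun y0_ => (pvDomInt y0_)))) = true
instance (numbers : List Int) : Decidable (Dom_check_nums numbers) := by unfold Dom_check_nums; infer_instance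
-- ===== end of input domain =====

-- B replaces A's index-driven append-until-7 while loop by a search for 7 plus a slice; objective: simpler.

-- ===== PORT A =====
-- the while loop: i scans by index, newlist accumulates, break on 7
def check_nums_loop (numbers : List Int) (i : Nat) (newlist : List Int) : List Int :=
  if h : i < numbers.length then
    if numbers[i] = 7 then newlist
    else check_nums_loop numbers (i + 1) (newlist ++ [numbers[i]])
  else newlist
termination_by numbers.length - i

def check_nums (numbers : List Int) : List Int :=
  if ¬ (5 ∈ numbers) then numbers
  else check_nums_loop numbers 0 []

-- ===== PORT B =====
def check_nums_alt (numbers : List Int) : List Int :=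
  if ¬ (5 ∈ numbers) then numbers
  else
    match PySem.List.index? numbers 7 with
    | some k => numbers.take k          -- numbers[:numbers.index(7)]
    | none => numbers                   -- numbers[:]

-- ===== PRECONDITION & SPEC =====
def Spec_check_nums (numbers : List Int) (out : List Int) : Prop := out = check_nums_alt numbers
instance (numbers : List Int) (out : List Int) : Decidable (Spec_check_nums numbers out) := by unfold Spec_check_nums; infer_instance

-- ===== CLAIM (what is proved, stated in full; the proofs are below) =====
def Claim_equal_check_nums : Prop := ∀ (numbers : List Int), Dom_check_nums numbers → Spec_check_nums numbers (check_nums numbers)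

-- ===== LEMMAS AND PROOFS =====

-- the loop from index i returns acc ++ (takeWhile (≠ 7) of the rest)
theorem check_nums_loop_eq (numbers : List Int) :
    ∀ (n i : Nat) (acc : List Int), numbers.length - i ≤ n →
      check_nums_loop numbers i acc = acc ++ (numbers.drop i).takeWhile (fun x => x ≠ 7) := by
  intro n
  induction n with
  | zero =>
    intro i acc h
    rw [check_nums_loop, dif_neg (by omega), List.drop_eq_nil_of_le (by omega)]
    simp
  | succ n ih =>
    intro i acc h
    rw [check_nums_loop]
    by_cases hlt : i < numbers.length
    · rw [dif_pos hlt]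
      have hdrop : numbers.drop i = numbers[i] :: numbers.drop (i + 1) :=
        List.drop_eq_getElem_cons hlt
      by_cases h7 : numbers[i] = 7
      · rw [if_pos h7, hdrop, h7, List.takeWhile_cons_of_neg (by simp), List.append_nil]
      · rw [if_neg h7, ih (i + 1) (acc ++ [numbers[i]]) (by omega),
            hdrop, List.takeWhile_cons_of_pos (by simp [h7])]
        simp
    · rw [dif_neg hlt, List.drop_eq_nil_of_le (by omega)]
      simp

theorem takeWhile_ne_eq_index (numbers : List Int) :
    numbers.takeWhile (fun x => x ≠ 7) =
      (match PySem.List.index? numbers 7 with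
       | some k => numbers.take k
       | none => numbers) := by
  induction numbers with
  | nil => simp [PySem.List.index?]
  | cons x xs ih =>
    by_cases h7 : x = 7
    · subst h7
      simp [PySem.List.index?_eq_idxOf?, List.idxOf?_cons]
    · have hmap : PySem.List.index? (x :: xs) 7 = (PySem.List.index? xs 7).map (· + 1) := by
        simp [PySem.List.index?_eq_idxOf?, List.idxOf?_cons, h7]
      rw [hmap]
      rw [List.takeWhile_cons_of_pos (by simp [h7])]
      cases hk : PySem.List.index? xs 7 with
      | none => simp only [hk] at ih; simp only [Option.map_none]; rw [ih]
      | some k => simp only [hk] at ih; simp only [Option.map_some, List.take_succ_cons]; rw [ih]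

-- ===== VERDICT (by name: the statement is the Claim_ definition above) =====
theorem check_nums_spec : Claim_equal_check_nums := by
  intro numbers _
  unfold Spec_check_nums check_nums check_nums_alt
  by_cases h5 : 5 ∈ numbers
  · simp only [h5, not_true_eq_false, if_false]
    rw [check_nums_loop_eq numbers numbers.length 0 [] (by omega), List.drop_zero,
      List.nil_append, takeWhile_ne_eq_index]
  · simp [h5]
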